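-- pv_equiv track=rewrite | github.com/michellePhan06/SteganographySite | steganography.py | _bit_positions
-- ===== SOURCE A (Python) =====
-- from typing import List
--
-- def _bit_positions(start_bit: int, period_list: List[int], mode: str, count: int) -> List[int]:
--     """
--     Generate `count` carrier bit positions for embedding/extraction.
--
--     Fixed mode  : positions are  start_bit + 1*L, start_bit + 2*L, …
--     Cycling mode: period cycles through period_list;
--                   positions advance by the current period each step.
--     """
--     positions = []
--     if mode == 'cycling':
--         period_cycle = period_list  # will cycle
--         pos = start_bit
--         for i in range(count):
--             p = period_cycle[i % len(period_cycle)]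
--             pos += p
--             positions.append(pos)
--     else:  # fixed
--         L = period_list[0]
--         for i in range(count):
--             positions.append(start_bit + (i + 1) * L)
--     return positions
-- ===== SOURCE B (Python) =====
-- from typing import List
--
-- def _bit_positions(start_bit: int, period_list: List[int], mode: str, count: int) -> List[int]:
--     # Closed form: precompute one cycle of cumulative offsets once, then compute each
--     # position directly by divmod indexing -- no running position across the count loop.
--     table = period_list if mode == 'cycling' else [period_list[0]]
--     pre = []
--     s = 0
--     for p in table:
--         s += p
--         pre.append(s)
--     n = len(table)
--     return [start_bit + (i // n) * s + pre[i % n] for i in range(count)]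
-- ===== Notes on version B (the rewrite author's own statement) =====
-- stated objective: alternative
-- what changed: Replaces A's running-position loop (and separate fixed-mode closed form) by a table-driven closed form: precompute one cycle of cumulative offsets and the cycle sum once, then compute every position independently as start_bit + (i//n)*cycle_sum + pre[i%n], so no state is carried across the count loop.
import Mathlib
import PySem

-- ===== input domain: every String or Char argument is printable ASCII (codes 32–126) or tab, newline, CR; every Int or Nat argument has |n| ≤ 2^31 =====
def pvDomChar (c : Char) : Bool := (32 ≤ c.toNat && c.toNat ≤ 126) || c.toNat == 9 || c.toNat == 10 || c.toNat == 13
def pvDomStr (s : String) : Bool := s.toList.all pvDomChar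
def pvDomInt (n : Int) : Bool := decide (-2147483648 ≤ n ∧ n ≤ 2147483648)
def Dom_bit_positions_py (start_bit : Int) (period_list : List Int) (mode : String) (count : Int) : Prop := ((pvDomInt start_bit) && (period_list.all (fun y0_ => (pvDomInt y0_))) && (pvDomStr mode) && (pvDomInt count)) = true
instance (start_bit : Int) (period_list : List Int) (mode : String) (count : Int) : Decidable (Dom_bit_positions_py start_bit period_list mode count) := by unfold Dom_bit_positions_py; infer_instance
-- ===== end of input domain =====

-- B replaces A's running-position loop by a table-driven closed form (one precomputed cycle of
-- cumulative offsets, each position computed independently by divmod indexing); objective: alternative.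

-- ===== PORT A =====
def bit_positions_py (start_bit : Int) (period_list : List Int) (mode : String) (count : Int) : List Int :=
  if mode == "cycling" then
    ((PySem.List.pyRange 0 count 1).foldl
      (fun (st : List Int × Int) i =>
        let p := PySem.List.pyGetD period_list (PySem.Int.mod i (period_list.length : Int)) 0
        (st.1 ++ [st.2 + p], st.2 + p)) ([], start_bit)).1
  else
    let L := PySem.List.pyGetD period_list 0 0
    (PySem.List.pyRange 0 count 1).foldl (fun acc i => acc ++ [start_bit + (i + 1) * L]) []

-- ===== PORT B =====
def bit_positions_py_alt (start_bit : Int) (period_list : List Int) (mode : String) (count : Int) : List Int :=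
  let table := if mode == "cycling" then period_list else [PySem.List.pyGetD period_list 0 0]
  let st := table.foldl (fun (st : List Int × Int) p => (st.1 ++ [st.2 + p], st.2 + p)) ([], 0)
  let n : Int := table.length
  (PySem.List.pyRange 0 count 1).map
    (fun i => start_bit + PySem.Int.floordiv i n * st.2 + PySem.List.pyGetD st.1 (PySem.Int.mod i n) 0)

-- ===== PRECONDITION & SPEC =====
-- Pre_ excludes exactly the inputs where A raises: an empty period_list in fixed mode
-- (IndexError from period_list[0]) or with count > 0 in cycling mode (ZeroDivisionError from i % 0).
def Pre_bit_positions_py (start_bit : Int) (period_list : List Int) (mode : String) (count : Int) : Prop :=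
  if mode = "cycling" then (period_list ≠ [] ∨ count ≤ 0) else period_list ≠ []
instance (start_bit : Int) (period_list : List Int) (mode : String) (count : Int) : Decidable (Pre_bit_positions_py start_bit period_list mode count) := by unfold Pre_bit_positions_py; infer_instance
def pvWitness_bit_positions_py : Int × List Int × String × Int := (3, [2, 5], "cycling", 4)

def Spec_bit_positions_py (start_bit : Int) (period_list : List Int) (mode : String) (count : Int) (out : List Int) : Prop := out = bit_positions_py_alt start_bit period_list mode count
instance (start_bit : Int) (period_list : List Int) (mode : String) (count : Int) (out : List Int) : Decidable (Spec_bit_positions_py start_bit period_list mode count out) := by unfold Spec_bit_positions_py; infer_instance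

-- ===== CLAIM =====
def Claim_equal_bit_positions_py : Prop := ∀ (start_bit : Int) (period_list : List Int) (mode : String) (count : Int), Dom_bit_positions_py start_bit period_list mode count → Pre_bit_positions_py start_bit period_list mode count → Spec_bit_positions_py start_bit period_list mode count (bit_positions_py start_bit period_list mode count)

-- ===== LEMMAS AND PROOFS =====

-- partial sums of an increment list starting after s
def pvPsum : Int → List Int → List Int
  | _, [] => []
  | s, x :: xs => (s + x) :: pvPsum (s + x) xs

theorem pvFold_eq (l : List Int) : ∀ (acc : List Int) (s : Int),
    l.foldl (fun (st : List Int × Int) p => (st.1 ++ [st.2 + p], st.2 + p)) (acc, s)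
      = (acc ++ pvPsum s l, s + l.sum) := by
  induction l with
  | nil => intro acc s; simp [pvPsum]
  | cons x xs ih =>
    intro acc s
    simp only [List.foldl_cons, pvPsum, List.sum_cons]
    rw [ih]
    simp
    ring

theorem pvFold_psum (f : Int → Int) (l : List Int) : ∀ (acc : List Int) (s : Int),
    (l.foldl (fun (st : List Int × Int) i => (st.1 ++ [st.2 + f i], st.2 + f i)) (acc, s)).1
      = acc ++ pvPsum s (l.map f) := by
  induction l with
  | nil => intro acc s; simp [pvPsum]
  | cons x xs ih =>
    intro acc s
    simp only [List.foldl_cons, List.map_cons, pvPsum]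
    rw [ih]
    simp

theorem pvPsum_append (l : List Int) (s x : Int) :
    pvPsum s (l ++ [x]) = pvPsum s l ++ [s + (l.sum + x)] := by
  induction l generalizing s with
  | nil => simp [pvPsum]
  | cons a as ih =>
    simp only [List.cons_append, pvPsum, List.sum_cons, ih]
    simp
    ring

theorem pvPsum_getD (l : List Int) : ∀ (s : Int) (r : Nat), r < l.length →
    (pvPsum s l).getD r 0 = s + (l.take (r + 1)).sum := by
  induction l with
  | nil => intro s r h; simp at h
  | cons x xs ih =>
    intro s r h
    cases r with
    | zero => simp [pvPsum]
    | succ m =>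
      simp only [pvPsum, List.getD_cons_succ, List.take_succ_cons, List.sum_cons]
      rw [ih (s + x) m (by simpa using h)]
      ring

-- divmod step: advancing one position within/around the cycle
theorem pvStep (table : List Int) (hn : 0 < table.length) (m : Nat) :
    (((m + 1) / table.length : Nat) : Int) * table.sum + (table.take ((m + 1) % table.length)).sum
      = ((m / table.length : Nat) : Int) * table.sum + (table.take (m % table.length + 1)).sum := by
  set n := table.length with hne
  have hr : m % n < n := Nat.mod_lt _ hn
  have hdm : m % n + m / n * n = m := Nat.mod_add_div' m n
  rcases Nat.lt_or_ge (m % n + 1) n with hlt | hge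
  · have h1 : (m + 1) / n = m / n := by
      have hm1 : m + 1 = (m % n + 1) + (m / n) * n := by omega
      rw [hm1, Nat.add_mul_div_right _ _ hn, Nat.div_eq_of_lt hlt, Nat.zero_add]
    have h2 : (m + 1) % n = m % n + 1 := by
      have hm1 : m + 1 = (m % n + 1) + (m / n) * n := by omega
      rw [hm1, Nat.add_mul_mod_self_right, Nat.mod_eq_of_lt hlt]
    rw [h1, h2]
  · have heq : m % n + 1 = n := by omega
    have h1 : (m + 1) / n = m / n + 1 := by
      have hm1 : m + 1 = n + (m / n) * n := by omega
      rw [hm1, Nat.add_mul_div_right _ _ hn, Nat.div_self hn, Nat.add_comm]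
    have h2 : (m + 1) % n = 0 := by
      have hm1 : m + 1 = n + (m / n) * n := by omega
      rw [hm1, Nat.add_mul_mod_self_right, Nat.mod_self]
    rw [h1, h2, heq, hne]
    simp [List.take_length]
    ring

-- total advance over m steps of the cycle
theorem pvCyc (table : List Int) (hn : 0 < table.length) (m : Nat) :
    ((List.range m).map (fun k => table.getD (k % table.length) 0)).sum
      = ((m / table.length : Nat) : Int) * table.sum + (table.take (m % table.length)).sum := by
  induction m with
  | zero => simp
  | succ c ih =>
    rw [List.range_succ, List.map_append, List.sum_append, ih]
    have hr : c % table.length < table.length := Nat.mod_lt _ hn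
    have : table.getD (c % table.length) 0 = table[c % table.length] := List.getD_eq_getElem _ _ hr
    rw [pvStep table hn c]
    simp only [List.map_cons, List.map_nil, List.sum_cons, List.sum_nil, this]
    rw [List.sum_take_succ _ _ hr]
    ring

-- main: the running partial sums equal the divmod closed form
theorem pvMain (table : List Int) (hn : 0 < table.length) (start : Int) (c : Nat) :
    pvPsum start ((List.range c).map (fun k => table.getD (k % table.length) 0))
      = (List.range c).map (fun k =>
          start + ((k / table.length : Nat) : Int) * table.sum
            + (pvPsum 0 table).getD (k % table.length) 0) := by
  induction c with
  | zero => simp [pvPsum]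
  | succ c ih =>
    rw [List.range_succ, List.map_append, List.map_append]
    simp only [List.map_cons, List.map_nil]
    rw [pvPsum_append, ih]
    congr 2
    have hr : c % table.length < table.length := Nat.mod_lt _ hn
    rw [pvCyc table hn c, pvPsum_getD table 0 _ hr,
        List.sum_take_succ _ _ hr, List.getD_eq_getElem _ _ hr]
    ring

-- ===== VERDICT =====
theorem bit_positions_py_spec : Claim_equal_bit_positions_py := by
  intro start_bit period_list mode count _ hpre
  unfold Spec_bit_positions_py bit_positions_py bit_positions_py_alt
  by_cases h : mode == "cycling"
  · simp only [h, if_true]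
    by_cases hcyc : period_list = []
    · -- Pre_ forces count ≤ 0: both sides are []
      subst hcyc
      have hm : mode = "cycling" := by simpa using h
      have hc : count ≤ 0 := by
        unfold Pre_bit_positions_py at hpre
        rw [if_pos hm] at hpre
        simpa using hpre
      rw [PySem.List.pyRange_one_eq_nil (by omega)]
      simp
    · have hn : 0 < period_list.length := List.length_pos_iff.mpr hcyc
      rw [pvFold_psum (fun i => PySem.List.pyGetD period_list (PySem.Int.mod i (period_list.length : Int)) 0),
          PySem.List.pyRange_one, List.map_map, List.map_map]
      simp only [Function.comp_def, Int.zero_add, PySem.Int.mod_natCast, PySem.List.pyGetD_natCast,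
        PySem.Int.floordiv_natCast, pvFold_eq, List.nil_append, Int.zero_add]
      exact pvMain period_list hn start_bit (count - 0).toNat
  · simp only [h, Bool.false_eq_true, if_false]
    rw [PySem.List.foldl_append_singleton_eq_map, PySem.List.pyRange_one]
    simp only [List.nil_append, List.map_map]
    apply List.map_congr_left
    intro k _
    simp only [Function.comp_def, Int.zero_add, pvFold_eq, List.nil_append, pvPsum,
      List.length_cons, List.length_nil, Nat.zero_add, PySem.Int.mod_natCast,
      PySem.Int.floordiv_natCast, PySem.List.pyGetD_natCast, Nat.div_one, Nat.mod_one]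
    simp
    ring
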